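-- pv_equiv track=rewrite | github.com/AVAuco/proxivideofriends | dataset_utils/load_sequences_from_episodes.py | get_max_class_occurrence
-- ===== SOURCE A (Python) =====
-- from collections import defaultdict, Counter
--
-- def get_max_class_occurrence(val_set):
--     """
--     Count occurrences per class, ignoring the null label [0, 0, 0, 0, 0, 0],
--     and return the maximum count among non-null classes.
--     """
--     counter = Counter()
--     for item in val_set:
--         label = tuple(item["label"])
--         # Ignore the null class and count only active labels
--         if any(label):
--             for i, v in enumerate(label):
--                 if v == 1:
--                     counter[i] += 1
--     return max(counter.values()) if counter else 0
-- ===== SOURCE B (Python) =====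
-- def get_max_class_occurrence(val_set):
--     """
--     Column-major recount: collect the active (non-null) labels, then count the
--     1-entries per label position and return the largest per-position count.
--     """
--     active = [item["label"] for item in val_set if any(item["label"])]
--     width = max(map(len, active), default=0)
--     return max((sum(1 for lab in active if j < len(lab) and lab[j] == 1)
--                 for j in range(width)), default=0)
-- ===== Notes on version B (the rewrite author's own statement) =====
-- stated objective: alternative
-- what changed: Row-by-row Counter accumulation over enumerate(label) is replaced by a column-major recount: collect active labels once, then take the max over label positions of the per-position count of 1s; Pre_ only excludes items missing the 'label' key, where both A and B raise KeyError.
import Mathlib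
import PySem

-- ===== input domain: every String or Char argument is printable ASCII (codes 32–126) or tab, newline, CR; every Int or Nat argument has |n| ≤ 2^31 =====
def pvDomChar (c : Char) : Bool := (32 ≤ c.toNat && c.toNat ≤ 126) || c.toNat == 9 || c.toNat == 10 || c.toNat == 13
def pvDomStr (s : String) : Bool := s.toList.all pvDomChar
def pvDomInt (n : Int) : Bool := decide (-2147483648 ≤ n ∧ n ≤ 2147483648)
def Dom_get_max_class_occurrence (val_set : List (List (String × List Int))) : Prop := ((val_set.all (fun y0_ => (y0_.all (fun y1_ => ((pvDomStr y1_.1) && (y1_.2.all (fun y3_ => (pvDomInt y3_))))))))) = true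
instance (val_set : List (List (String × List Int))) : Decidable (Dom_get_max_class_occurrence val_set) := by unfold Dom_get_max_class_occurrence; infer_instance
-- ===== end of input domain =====

-- B replaces A's row-by-row Counter accumulation by a column-major recount over the active labels
-- (max over label positions of the per-position count of 1s); objective: alternative decomposition, same cost.

-- item["label"] (KeyError when absent is excluded by Pre_; .getD [] is unreachable inside Pre_)
def pvLabel (item : List (String × List Int)) : List Int :=
  ((PySem.Dict.mk item).get? "label").getD []

-- ===== PORT A =====
-- counter after A's loop
def pvCounter (val_set : List (List (String × List Int))) : PySem.Dict Int Int :=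
  val_set.foldl (fun (c : PySem.Dict Int Int) item =>
    if (pvLabel item).any (fun v => decide (v ≠ 0)) then
      (PySem.List.enumerate (pvLabel item)).foldl
        (fun c p => if p.2 = 1 then c.modify p.1 0 (· + 1) else c) c
    else c) PySem.Dict.empty

def get_max_class_occurrence (val_set : List (List (String × List Int))) : Int :=
  if (pvCounter val_set).items = [] then 0
  else (PySem.List.max? (pvCounter val_set).values (fun x => x)).getD 0

-- ===== PORT B =====
-- active = [item["label"] for item in val_set if any(item["label"])]
def pvActive (val_set : List (List (String × List Int))) : List (List Int) :=
  (val_set.filter (fun item => (pvLabel item).any (fun v => decide (v ≠ 0)))).map pvLabel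

-- width = max(map(len, active), default=0)
def pvWidth (val_set : List (List (String × List Int))) : Int :=
  PySem.List.maxD ((pvActive val_set).map (fun l => (l.length : Int))) (fun x => x) 0

def get_max_class_occurrence_alt (val_set : List (List (String × List Int))) : Int :=
  PySem.List.maxD ((PySem.List.pyRange 0 (pvWidth val_set) 1).map (fun j =>
      (pvActive val_set).foldl (fun s lab =>
        if j < (lab.length : Int) ∧ PySem.List.pyGet? lab j = some 1 then s + 1 else s)
        (0 : Int)))
    (fun x => x) 0

-- ===== PRECONDITION & SPEC =====
-- Pre_ excludes exactly the items without a "label" key, on which A (and B) raise KeyError.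
def Pre_get_max_class_occurrence (val_set : List (List (String × List Int))) : Prop :=
  ∀ item ∈ val_set, ((PySem.Dict.mk item).get? "label").isSome = true
instance (val_set : List (List (String × List Int))) : Decidable (Pre_get_max_class_occurrence val_set) := by unfold Pre_get_max_class_occurrence; infer_instance

def pvWitness_get_max_class_occurrence : (List (List (String × List Int))) :=
  [[("label", [1, 0, 0, 0, 0, 0])], [("label", [0, 1, 0, 0, 0, 0])], [("label", [0, 1, 0, 0, 0, 0])]]

def Spec_get_max_class_occurrence (val_set : List (List (String × List Int))) (out : Int) : Prop := out = get_max_class_occurrence_alt val_set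
instance (val_set : List (List (String × List Int))) (out : Int) : Decidable (Spec_get_max_class_occurrence val_set out) := by unfold Spec_get_max_class_occurrence; infer_instance

-- ===== CLAIM (what is proved, stated in full; the proofs are below) =====
def Claim_equal_get_max_class_occurrence : Prop := ∀ (val_set : List (List (String × List Int))), Dom_get_max_class_occurrence val_set → Pre_get_max_class_occurrence val_set → Spec_get_max_class_occurrence val_set (get_max_class_occurrence val_set)

-- ===== LEMMAS AND PROOFS =====

-- the list of indices i with label[i] == 1 that A's inner loop feeds to the counter
def pvIdxs (lab : List Int) : List Int :=
  ((PySem.List.enumerate lab).filter (fun p => decide (p.2 = 1))).map (·.1)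

-- all counter increments of A, flattened
def pvL (val_set : List (List (String × List Int))) : List Int :=
  (pvActive val_set).flatMap pvIdxs

theorem pvIdxs_nodup (lab : List Int) : (pvIdxs lab).Nodup := by
  have h := (PySem.List.pairwise_lt_enumerate lab 0).filter (fun p => decide (p.2 = 1))
  have h2 : (((PySem.List.enumerate lab).filter (fun p => decide (p.2 = 1))).map (·.1)).Pairwise (· < ·) :=
    List.pairwise_map.mpr h
  exact (h2.imp fun {a b} hab => ne_of_lt hab)

theorem mem_pvIdxs (lab : List Int) (j : Int) (hj : 0 ≤ j) :
    j ∈ pvIdxs lab ↔ (j < (lab.length : Int) ∧ PySem.List.pyGet? lab j = some 1) := by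
  unfold pvIdxs
  simp only [List.mem_map, List.mem_filter, PySem.List.mem_enumerate_iff]
  constructor
  · rintro ⟨p, ⟨⟨k, hk, rfl⟩, hv⟩, rfl⟩
    simp only [decide_eq_true_eq] at hv
    refine ⟨by omega, ?_⟩
    simp only [zero_add]
    rw [PySem.List.pyGet?_natCast, List.getElem?_eq_getElem hk]
    simp [hv]
  · rintro ⟨hlt, hget⟩
    refine ⟨(j, 1), ⟨⟨j.toNat, by omega, ?_⟩, by simp⟩, rfl⟩
    have hjc : ((j.toNat : Nat) : Int) = j := by omega
    rw [← hjc] at hget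
    rw [PySem.List.pyGet?_natCast] at hget
    have hklt : j.toNat < lab.length := by omega
    rw [List.getElem?_eq_getElem hklt] at hget
    simp only [Option.some.injEq] at hget
    simp [hjc, hget]

theorem count_pvIdxs (lab : List Int) (j : Int) (hj : 0 ≤ j) :
    (pvIdxs lab).count j
      = (if j < (lab.length : Int) ∧ PySem.List.pyGet? lab j = some 1 then 1 else 0) := by
  by_cases h : j < (lab.length : Int) ∧ PySem.List.pyGet? lab j = some 1
  · rw [if_pos h]
    exact List.count_eq_one_of_mem (pvIdxs_nodup lab) ((mem_pvIdxs lab j hj).mpr h)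
  · rw [if_neg h]
    exact List.count_eq_zero_of_not_mem (fun hm => h ((mem_pvIdxs lab j hj).mp hm))

theorem count_pvL (val_set : List (List (String × List Int))) (j : Int) (hj : 0 ≤ j) :
    ((pvL val_set).count j : Int)
      = (pvActive val_set).foldl (fun s lab =>
          if j < (lab.length : Int) ∧ PySem.List.pyGet? lab j = some 1 then s + 1 else s)
          (0 : Int) := by
  rw [PySem.List.foldl_ite_add_one]
  simp only [zero_add]
  unfold pvL
  congr 1
  induction pvActive val_set with
  | nil => simp
  | cons lab rest ih =>
      simp only [List.flatMap_cons, List.count_append, List.countP_cons, ih]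
      rw [count_pvIdxs lab j hj]
      by_cases h : j < (lab.length : Int) ∧ PySem.List.pyGet? lab j = some 1
      · simp [h]
        omega
      · simp [h]

-- A's counter is Counter(pvL val_set)
theorem counter_eq (val_set : List (List (String × List Int))) :
    pvCounter val_set = PySem.Dict.counter (pvL val_set) := by
  unfold pvCounter
  have inner : ∀ (lab : List Int) (c : PySem.Dict Int Int),
      (PySem.List.enumerate lab).foldl
        (fun c p => if p.2 = 1 then c.modify p.1 0 (· + 1) else c) c
      = (pvIdxs lab).foldl (fun d x => d.modify x 0 (· + 1)) c := by
    intro lab c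
    rw [PySem.List.foldl_ite_eq_foldl_filter (fun (q : Int × Int) => q.2 = 1)
        (fun (d : PySem.Dict Int Int) (q : Int × Int) => d.modify q.1 0 (· + 1))]
    unfold pvIdxs
    rw [List.foldl_map]
  have outer : val_set.foldl (fun (c : PySem.Dict Int Int) item =>
      if (pvLabel item).any (fun v => decide (v ≠ 0)) then
        (PySem.List.enumerate (pvLabel item)).foldl
          (fun c p => if p.2 = 1 then c.modify p.1 0 (· + 1) else c) c
      else c) PySem.Dict.empty
      = (pvActive val_set).foldl
          (fun c lab => (pvIdxs lab).foldl (fun d x => d.modify x 0 (· + 1)) c)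
          PySem.Dict.empty := by
    rw [PySem.List.foldl_ite_eq_foldl_filter
        (fun item => (pvLabel item).any (fun v => decide (v ≠ 0)) = true)
        (fun (c : PySem.Dict Int Int) (item : List (String × List Int)) =>
          (PySem.List.enumerate (pvLabel item)).foldl
            (fun (c : PySem.Dict Int Int) (p : Int × Int) =>
              if p.2 = 1 then c.modify p.1 0 (· + 1) else c) c)]
    simp only [Bool.decide_coe]
    unfold pvActive
    rw [List.foldl_map]
    apply PySem.List.foldl_congr_mem
    intro acc x hx
    rw [inner]
  rw [outer]
  unfold pvL
  rw [← List.foldl_flatMap]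
  rw [PySem.Dict.counter_eq_foldl]

theorem pvL_nonneg (val_set : List (List (String × List Int))) :
    ∀ k ∈ pvL val_set, 0 ≤ k := by
  intro k hk
  unfold pvL at hk
  rcases List.mem_flatMap.mp hk with ⟨lab, _, hkl⟩
  unfold pvIdxs at hkl
  rcases List.mem_map.mp hkl with ⟨p, hp, rfl⟩
  rcases (PySem.List.mem_enumerate_iff lab 0 p).mp (List.mem_filter.mp hp).1 with ⟨n, _, rfl⟩
  simp

theorem pvL_lt_width (val_set : List (List (String × List Int))) :
    ∀ k ∈ pvL val_set, k < pvWidth val_set := by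
  intro k hk
  unfold pvL at hk
  rcases List.mem_flatMap.mp hk with ⟨lab, hlab, hkl⟩
  have hk0 : 0 ≤ k := pvL_nonneg val_set k (by unfold pvL; exact List.mem_flatMap.mpr ⟨lab, hlab, hkl⟩)
  have hlt : k < (lab.length : Int) := ((mem_pvIdxs lab k hk0).mp hkl).1
  have hmem : (lab.length : Int) ∈ (pvActive val_set).map (fun l => (l.length : Int)) :=
    List.mem_map.mpr ⟨lab, hlab, rfl⟩
  have := PySem.List.le_maxD_id ((pvActive val_set).map (fun l => (l.length : Int))) 0
    (lab.length : Int) hmem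
  unfold pvWidth
  omega

-- ===== VERDICT (by name: the statement is the Claim_ definition above) =====
theorem get_max_class_occurrence_spec : Claim_equal_get_max_class_occurrence := by
  intro val_set _ _
  unfold Spec_get_max_class_occurrence
  unfold get_max_class_occurrence get_max_class_occurrence_alt
  rw [counter_eq]
  set L := pvL val_set with hL
  set width := pvWidth val_set with hw
  set W := (PySem.List.pyRange 0 width 1).map (fun j =>
      (pvActive val_set).foldl (fun s lab =>
        if j < (lab.length : Int) ∧ PySem.List.pyGet? lab j = some 1 then s + 1 else s)
        (0 : Int)) with hW
  have hWc : W = (PySem.List.pyRange 0 width 1).map (fun j => ((L.count j : Nat) : Int)) := by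
    rw [hW]
    apply List.map_congr_left
    intro j hj
    have hj0 : 0 ≤ j := (PySem.List.mem_pyRange_one.mp hj).1
    rw [← count_pvL val_set j hj0]
  have hWmem : ∀ w ∈ W, ∃ j, 0 ≤ j ∧ j < width ∧ w = ((L.count j : Nat) : Int) := by
    intro w hw'
    rw [hWc] at hw'
    rcases List.mem_map.mp hw' with ⟨j, hj, rfl⟩
    rcases PySem.List.mem_pyRange_one.mp hj with ⟨h1, h2⟩
    exact ⟨j, h1, h2, rfl⟩
  have hVmem : ∀ k ∈ L, ((L.count k : Nat) : Int) ∈ W := by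
    intro k hkL
    rw [hWc]
    refine List.mem_map.mpr ⟨k, ?_, rfl⟩
    exact PySem.List.mem_pyRange_one.mpr ⟨pvL_nonneg val_set k hkL, pvL_lt_width val_set k hkL⟩
  clear_value L width W
  by_cases hnil : L = []
  · -- counter empty, and every column count is 0
    subst hnil
    simp only [PySem.Dict.items_counter]
    rw [if_pos (by simp [PySem.Set.ofList])]
    by_cases hWnil : W = []
    · rw [hWnil, PySem.List.maxD_nil]
    · have hmem := PySem.List.maxD_mem W (fun x => x) 0 hWnil
      rcases hWmem _ hmem with ⟨j, _, _, hval⟩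
      rw [hval]
      simp
  · -- counter nonempty
    have hitems : (PySem.Dict.counter L).items
        = (PySem.Set.ofList L).map (fun k => (k, ((L.count k : Nat) : Int))) :=
      PySem.Dict.items_counter L
    have hSne : PySem.Set.ofList L ≠ [] := by
      rcases L with _ | ⟨x, xs⟩
      · exact absurd rfl hnil
      · intro h
        have : x ∈ PySem.Set.ofList (x :: xs) := (PySem.Set.mem_ofList _ _).mpr (List.mem_cons_self)
        rw [h] at this
        exact absurd this (List.not_mem_nil)
    rw [if_neg (by rw [hitems]; simpa using hSne)]
    have hvals : (PySem.Dict.counter L).values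
        = (PySem.Set.ofList L).map (fun k => ((L.count k : Nat) : Int)) := by
      show (PySem.Dict.counter L).items.map (·.2) = _
      rw [hitems, List.map_map]
      rfl
    have hVne : (PySem.Dict.counter L).values ≠ [] := by
      rw [hvals]; simpa using hSne
    rcases hm : PySem.List.max? (PySem.Dict.counter L).values (fun x => x) with _ | m
    · exact absurd ((PySem.List.max?_eq_none_iff _ _).mp hm) hVne
    · simp only [Option.getD_some]
      have hmmem := PySem.List.max?_mem hm
      have hmmax := PySem.List.max?_isMax hm
      rw [hvals] at hmmem
      rcases List.mem_map.mp hmmem with ⟨k, hkS, hkv⟩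
      have hkL : k ∈ L := (PySem.Set.mem_ofList _ _).mp hkS
      have hWne : W ≠ [] := by
        intro h
        have := hVmem k hkL
        rw [h] at this
        exact absurd this (List.not_mem_nil)
      apply le_antisymm
      · -- m ∈ W, so m ≤ maxD W
        have : m ∈ W := by rw [← hkv]; exact hVmem k hkL
        exact PySem.List.le_maxD_id W 0 m this
      · -- maxD W is a column count; bounded by m
        have hmem := PySem.List.maxD_mem W (fun x => x) 0 hWne
        rcases hWmem _ hmem with ⟨j, hj0, hjw, hval⟩
        by_cases hjL : j ∈ L
        · have : ((L.count j : Nat) : Int) ∈ (PySem.Dict.counter L).values := by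
            rw [hvals]
            exact List.mem_map.mpr ⟨j, (PySem.Set.mem_ofList _ _).mpr hjL, rfl⟩
          have := hmmax _ this
          rw [hval]; exact this
        · have hz : L.count j = 0 := List.count_eq_zero_of_not_mem hjL
          have hpos : 1 ≤ L.count k := List.count_pos_iff.mpr hkL
          rw [hval, hz]
          have : (1 : Int) ≤ ((L.count k : Nat) : Int) := by exact_mod_cast hpos
          omega
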